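-- pv_equiv track=rewrite | github.com/JKBGIT1/1.zadanie-UI | zadanie/tretipokus.py | zistiPocetRoznych
-- ===== SOURCE A (Python) =====
-- def zistiPocetRoznych(obmena, mapaKoniec):
--     zhoda = False
--     vzdialenost = 0
--     for i in range(len(obmena)):
--         for j in range(len(obmena[i])):
--             zhoda = False
--             for k in range(len(mapaKoniec)):
--                 for l in range(len(mapaKoniec[k])):
--                     if obmena[i][j] == mapaKoniec[k][l]:
--                         zhoda = True
--                         vzdialenostX = vzdialenostY = 0
--                         if i - k < 0:
--                             vzdialenostX = (i - k) * (-1)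
--                         else:
--                             vzdialenostX = (i - k)
--                         if j - l < 0:
--                             vzdialenostY = (j - l) * (-1)
--                         else:
--                             vzdialenostY = (j - l)
--                         vzdialenost = vzdialenost + vzdialenostX + vzdialenostY
--                 if zhoda:
--                     break
--
--     return vzdialenost
-- ===== SOURCE B (Python) =====
-- def zistiPocetRoznych(obmena, mapaKoniec):
--     # value -> (first row index containing it, list of its column positions in that row)
--     first = {}
--     for k, row in enumerate(mapaKoniec):
--         for l, v in enumerate(row):
--             if v not in first:
--                 first[v] = (k, [l])
--             elif first[v][0] == k:
--                 first[v] = (k, first[v][1] + [l])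
--     vzdialenost = 0
--     for i, row in enumerate(obmena):
--         for j, v in enumerate(row):
--             if v in first:
--                 k, cols = first[v]
--                 vzdialenost += len(cols) * abs(i - k) + sum(abs(j - l) for l in cols)
--     return vzdialenost
-- ===== Notes on version B (the rewrite author's own statement) =====
-- stated objective: faster
-- what changed: Instead of scanning all of mapaKoniec for every cell of obmena (with a break after the first matching row), B precomputes one dict mapping each value to its first row index and that row's column positions, then answers each cell with a single lookup plus a per-column sum.
import Mathlib
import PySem

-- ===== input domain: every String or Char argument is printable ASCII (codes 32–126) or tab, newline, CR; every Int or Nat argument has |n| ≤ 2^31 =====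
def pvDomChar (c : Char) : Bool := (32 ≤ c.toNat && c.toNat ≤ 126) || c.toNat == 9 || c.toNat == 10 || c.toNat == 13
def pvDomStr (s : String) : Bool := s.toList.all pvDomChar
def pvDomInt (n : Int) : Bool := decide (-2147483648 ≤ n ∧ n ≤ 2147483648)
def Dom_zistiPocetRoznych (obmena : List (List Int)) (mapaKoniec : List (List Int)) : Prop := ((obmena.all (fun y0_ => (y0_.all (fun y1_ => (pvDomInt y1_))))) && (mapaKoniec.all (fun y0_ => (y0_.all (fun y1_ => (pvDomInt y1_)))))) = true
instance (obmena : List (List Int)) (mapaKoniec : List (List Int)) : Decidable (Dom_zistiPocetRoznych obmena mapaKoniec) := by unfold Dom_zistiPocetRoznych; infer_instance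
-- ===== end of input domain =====

-- B replaces A's rescan of all of mapaKoniec per cell by one precomputed dict value -> (first row, columns); objective: faster.

-- ===== PORT A =====
-- the `for l in range(len(mapaKoniec[k]))` loop; state = (zhoda, vzdialenost)
def pvA_row (x i j k : Int) (row : List Int) (l : Int) (st : Bool × Int) : Bool × Int :=
  match row with
  | [] => st
  | w :: rest =>
      pvA_row x i j k rest (l + 1)
        (if x == w then
          (true, st.2 + (if i - k < 0 then (i - k) * (-1) else (i - k))
                      + (if j - l < 0 then (j - l) * (-1) else (j - l)))
        else st)

-- the `for k in range(len(mapaKoniec))` loop with `if zhoda: break`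
def pvA_k (x i j : Int) (rows : List (List Int)) (k vz : Int) : Int :=
  match rows with
  | [] => vz
  | row :: rest =>
      let st := pvA_row x i j k row 0 (false, vz)
      if st.1 then st.2 else pvA_k x i j rest (k + 1) st.2

-- the `for j in range(len(obmena[i]))` loop
def pvA_cells (mapa : List (List Int)) (i j vz : Int) (row : List Int) : Int :=
  match row with
  | [] => vz
  | x :: rest => pvA_cells mapa i (j + 1) (pvA_k x i j mapa 0 vz) rest

-- the `for i in range(len(obmena))` loop
def pvA_rows (mapa : List (List Int)) (i vz : Int) (rows : List (List Int)) : Int :=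
  match rows with
  | [] => vz
  | row :: rest => pvA_rows mapa (i + 1) (pvA_cells mapa i 0 vz row) rest

def zistiPocetRoznych (obmena : List (List Int)) (mapaKoniec : List (List Int)) : Int :=
  pvA_rows mapaKoniec 0 0 obmena

-- ===== PORT B =====
-- `for l, v in enumerate(row)`: record first row's columns per value
def pvB_row (k : Int) (row : List Int) (l : Int) (d : PySem.Dict Int (Int × List Int)) :
    PySem.Dict Int (Int × List Int) :=
  match row with
  | [] => d
  | v :: rest =>
      pvB_row k rest (l + 1)
        (match d.get? v with
         | none => d.insert v (k, [l])
         | some pr => if pr.1 == k then d.insert v (k, pr.2 ++ [l]) else d)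

-- `for k, row in enumerate(mapaKoniec)`
def pvB_build (rows : List (List Int)) (k : Int) (d : PySem.Dict Int (Int × List Int)) :
    PySem.Dict Int (Int × List Int) :=
  match rows with
  | [] => d
  | row :: rest => pvB_build rest (k + 1) (pvB_row k row 0 d)

-- `for j, v in enumerate(row)`: one dict lookup per cell
def pvB_cells (first : PySem.Dict Int (Int × List Int)) (i j vz : Int) (row : List Int) : Int :=
  match row with
  | [] => vz
  | v :: rest =>
      pvB_cells first i (j + 1)
        (match first.get? v with
         | none => vz
         | some pr => vz + (pr.2.length : Int) * |i - pr.1|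
                         + pr.2.foldl (fun s l => s + |j - l|) 0) rest

-- `for i, row in enumerate(obmena)`
def pvB_rows (first : PySem.Dict Int (Int × List Int)) (i vz : Int) (rows : List (List Int)) : Int :=
  match rows with
  | [] => vz
  | row :: rest => pvB_rows first (i + 1) (pvB_cells first i 0 vz row) rest

def zistiPocetRoznych_alt (obmena : List (List Int)) (mapaKoniec : List (List Int)) : Int :=
  pvB_rows (pvB_build mapaKoniec 0 PySem.Dict.empty) 0 0 obmena

-- ===== PRECONDITION & SPEC =====
def Spec_zistiPocetRoznych (obmena : List (List Int)) (mapaKoniec : List (List Int)) (out : Int) : Prop := out = zistiPocetRoznych_alt obmena mapaKoniec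
instance (obmena : List (List Int)) (mapaKoniec : List (List Int)) (out : Int) : Decidable (Spec_zistiPocetRoznych obmena mapaKoniec out) := by unfold Spec_zistiPocetRoznych; infer_instance

-- ===== CLAIM (what is proved, stated in full; the proofs are below) =====
def Claim_equal_zistiPocetRoznych : Prop := ∀ (obmena : List (List Int)) (mapaKoniec : List (List Int)), Dom_zistiPocetRoznych obmena mapaKoniec → Spec_zistiPocetRoznych obmena mapaKoniec (zistiPocetRoznych obmena mapaKoniec)

-- ===== LEMMAS AND PROOFS =====

-- column positions of v in a row, numbered from l
def pvCols (row : List Int) (v : Int) (l : Int) : List Int :=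
  match row with
  | [] => []
  | w :: rest => (if w = v then [l] else []) ++ pvCols rest v (l + 1)

-- first row (with its index) containing v, paired with v's columns there
def pvFirst (rows : List (List Int)) (k : Int) (v : Int) : Option (Int × List Int) :=
  match rows with
  | [] => none
  | row :: rest => if v ∈ row then some (k, pvCols row v 0) else pvFirst rest (k + 1) v

def pvS (i j k : Int) (cols : List Int) : Int :=
  cols.foldl (fun s l => s + (|i - k| + |j - l|)) 0

def pvContrib (i j : Int) : Option (Int × List Int) → Int
  | none => 0
  | some pr => pvS i j pr.1 pr.2

lemma pvCols_of_not_mem (row : List Int) (v : Int) (h : v ∉ row) :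
    ∀ l, pvCols row v l = [] := by
  induction row with
  | nil => intro l; rfl
  | cons w rest ih =>
      intro l
      simp only [List.mem_cons, not_or] at h
      simp [pvCols, Ne.symm h.1, ih h.2]

lemma pvS_shift (i j k : Int) (cols : List Int) (a : Int) :
    cols.foldl (fun s l => s + (|i - k| + |j - l|)) a = a + pvS i j k cols := by
  unfold pvS; rw [PySem.List.foldl_add, PySem.List.foldl_add]; ring

lemma pvS_cons (i j k c : Int) (cs : List Int) :
    pvS i j k (c :: cs) = (|i - k| + |j - c|) + pvS i j k cs := by
  show (c :: cs).foldl (fun s l => s + (|i - k| + |j - l|)) 0 = _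
  rw [List.foldl_cons, pvS_shift]; ring

lemma pvAbsIf (d : Int) : (if d < 0 then d * (-1) else d) = |d| := by
  rcases lt_or_ge d 0 with h | h
  · rw [if_pos h, abs_of_neg h]; ring
  · rw [if_neg (not_lt.mpr h), abs_of_nonneg h]

lemma pvA_row_eq (x i j k : Int) :
    ∀ (row : List Int) (l : Int) (b : Bool) (vz : Int),
      pvA_row x i j k row l (b, vz)
        = ((b || decide (x ∈ row)), vz + pvS i j k (pvCols row x l)) := by
  intro row
  induction row with
  | nil => intro l b vz; simp [pvA_row, pvCols, pvS]
  | cons w rest ih =>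
      intro l b vz
      by_cases hxw : x = w
      · rw [pvA_row, if_pos (by simpa using hxw), ih]
        rw [Prod.mk.injEq]
        constructor
        · simp [hxw]
        · rw [pvAbsIf, pvAbsIf,
              show pvCols (w :: rest) x l = l :: pvCols rest x (l + 1) by simp [pvCols, hxw],
              pvS_cons]
          ring
      · rw [pvA_row, if_neg (by simpa using hxw), ih]
        rw [Prod.mk.injEq]
        constructor
        · simp [List.mem_cons, hxw]
        · rw [show pvCols (w :: rest) x l = pvCols rest x (l + 1) by
                simp [pvCols, Ne.symm hxw]]

lemma pvA_k_eq (x i j : Int) :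
    ∀ (rows : List (List Int)) (k vz : Int),
      pvA_k x i j rows k vz = vz + pvContrib i j (pvFirst rows k x) := by
  intro rows
  induction rows with
  | nil => intro k vz; simp [pvA_k, pvFirst, pvContrib]
  | cons row rest ih =>
      intro k vz
      rw [pvA_k]
      simp only [pvA_row_eq, Bool.false_or]
      by_cases hm : x ∈ row
      · rw [if_pos (by simpa using hm)]
        simp [pvFirst, hm, pvContrib]
      · rw [if_neg (by simpa using hm), ih]
        rw [pvCols_of_not_mem row x hm 0]
        simp [pvS, pvFirst, hm]

lemma pvB_row_get? (v k : Int) :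
    ∀ (row : List Int) (l : Int) (d : PySem.Dict Int (Int × List Int)),
      (pvB_row k row l d).get? v
      = (match d.get? v with
         | none => if v ∈ row then some (k, pvCols row v l) else none
         | some pr => if pr.1 = k then some (k, pr.2 ++ pvCols row v l) else some pr) := by
  intro row
  induction row with
  | nil =>
      intro l d
      simp only [pvB_row, pvCols]
      cases d.get? v with
      | none => simp
      | some pr => by_cases h : pr.1 = k <;> simp [h, Prod.ext_iff]
  | cons w rest ih =>
      intro l d
      rw [pvB_row]
      by_cases hwv : w = v
      · subst hwv
        cases hd : d.get? w with
        | none =>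
            simp only [hd]
            rw [ih, PySem.Dict.get?_insert_self]
            simp [pvCols, List.mem_cons]
        | some pr =>
            simp only [hd]
            by_cases hk : pr.1 = k
            · rw [if_pos (by simpa using hk), ih, PySem.Dict.get?_insert_self]
              simp [hk, pvCols, List.append_assoc]
            · rw [if_neg (by simpa using hk), ih, hd]
              simp [hk, pvCols]
      · have hne : v ≠ w := fun h => hwv h.symm
        cases hd : d.get? w with
        | none =>
            simp only [hd]
            rw [ih, PySem.Dict.get?_insert]
            simp only [if_neg hne]
            rw [show pvCols (w :: rest) v l = pvCols rest v (l + 1) by simp [pvCols, hwv]]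
            simp [List.mem_cons, hne]
        | some pr =>
            simp only [hd]
            by_cases hk : pr.1 = k
            · rw [if_pos (by simpa using hk), ih, PySem.Dict.get?_insert]
              simp only [if_neg hne]
              rw [show pvCols (w :: rest) v l = pvCols rest v (l + 1) by simp [pvCols, hwv]]
              simp [List.mem_cons, hne]
            · rw [if_neg (by simpa using hk), ih]
              rw [show pvCols (w :: rest) v l = pvCols rest v (l + 1) by simp [pvCols, hwv]]
              simp [List.mem_cons, hne]

lemma pvB_build_get? (v : Int) :
    ∀ (rows : List (List Int)) (k : Int) (d : PySem.Dict Int (Int × List Int)),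
      (∀ pr, d.get? v = some pr → pr.1 < k) →
      (pvB_build rows k d).get? v
      = (match d.get? v with
         | some pr => some pr
         | none => pvFirst rows k v) := by
  intro rows
  induction rows with
  | nil =>
      intro k d _
      simp only [pvB_build, pvFirst]
      cases d.get? v with
      | none => rfl
      | some pr => rfl
  | cons row rest ih =>
      intro k d hinv
      rw [pvB_build]
      cases hd : d.get? v with
      | some pr =>
          have hlt := hinv pr hd
          have h1 : (pvB_row k row 0 d).get? v = some pr := by
            rw [pvB_row_get? v k row 0 d, hd]
            simp [Int.ne_of_lt hlt]
          rw [ih (k + 1) _ (by intro pr' h'; rw [h1] at h'; cases h'; omega), h1]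
      | none =>
          by_cases hm : v ∈ row
          · have h1 : (pvB_row k row 0 d).get? v = some (k, pvCols row v 0) := by
              rw [pvB_row_get? v k row 0 d, hd]; simp [hm]
            rw [ih (k + 1) _ (by intro pr' h'; rw [h1] at h'; cases h'; omega), h1]
            simp [pvFirst, hm]
          · have h1 : (pvB_row k row 0 d).get? v = none := by
              rw [pvB_row_get? v k row 0 d, hd]; simp [hm]
            rw [ih (k + 1) _ (by intro pr' h'; rw [h1] at h'; cases h'), h1]
            simp [pvFirst, hm]

lemma pvB_cell (i j k : Int) (cols : List Int) :
    (cols.length : Int) * |i - k| + cols.foldl (fun s l => s + |j - l|) 0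
      = pvS i j k cols := by
  unfold pvS
  rw [PySem.List.foldl_add, PySem.List.foldl_add]
  induction cols with
  | nil => simp
  | cons c cs ihc =>
      simp only [List.map_cons, List.sum_cons, List.length_cons] at *
      push_cast
      linarith

-- per-cell agreement, given the dict characterisation
lemma pv_cell_eq (mapa : List (List Int)) (x i j vz : Int) :
    pvA_k x i j mapa 0 vz
      = (match (pvB_build mapa 0 PySem.Dict.empty).get? x with
         | none => vz
         | some pr => vz + (pr.2.length : Int) * |i - pr.1|
                         + pr.2.foldl (fun s l => s + |j - l|) 0) := by
  rw [pvA_k_eq,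
      pvB_build_get? x mapa 0 PySem.Dict.empty (by intro pr h; rw [PySem.Dict.get?_empty] at h; cases h),
      PySem.Dict.get?_empty]
  cases h : pvFirst mapa 0 x with
  | none => simp [pvContrib]
  | some pr =>
      show vz + pvContrib i j (some pr)
        = vz + (pr.2.length : Int) * |i - pr.1| + pr.2.foldl (fun s l => s + |j - l|) 0
      rw [pvContrib, add_assoc, pvB_cell]

lemma pv_cells_eq (mapa : List (List Int)) :
    ∀ (row : List Int) (i j vz : Int),
      pvA_cells mapa i j vz row
        = pvB_cells (pvB_build mapa 0 PySem.Dict.empty) i j vz row := by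
  intro row
  induction row with
  | nil => intro i j vz; rfl
  | cons x rest ih =>
      intro i j vz
      rw [pvA_cells, pvB_cells, ih, pv_cell_eq]

lemma pv_rows_eq (mapa : List (List Int)) :
    ∀ (rows : List (List Int)) (i vz : Int),
      pvA_rows mapa i vz rows
        = pvB_rows (pvB_build mapa 0 PySem.Dict.empty) i vz rows := by
  intro rows
  induction rows with
  | nil => intro i vz; rfl
  | cons row rest ih =>
      intro i vz
      rw [pvA_rows, pvB_rows, ih, pv_cells_eq]

-- ===== VERDICT (by name: the statement is the Claim_ definition above) =====
theorem zistiPocetRoznych_spec : Claim_equal_zistiPocetRoznych := by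
  intro obmena mapaKoniec _
  unfold Spec_zistiPocetRoznych zistiPocetRoznych zistiPocetRoznych_alt
  exact pv_rows_eq mapaKoniec obmena 0 0
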